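-- pv_equiv track=rewrite | github.com/ella00100/Python_basic | day05_calculate_fee2.py | calculate_fee2
-- ===== SOURCE A (Python) =====
-- def calculate_fee2(args):   #매개변수를 리스트로 받음
--     """
--     놀이공원 요금 계산 프로그램 vr.2
--     :param args: ages in list
--     :return: [total fee, adults, children]  #반환 값 리스트로
--     """
--     total_fee= 0
--     adults = 0
--     children = 0
--     for age in args:
--         if 19 <= age:
--             adults += 1
--             total_fee = total_fee + 10000
--         else:
--             children += 1
--             total_fee = total_fee + 3000
--     return [len(args), adults, children, total_fee]
-- ===== SOURCE B (Python) =====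
-- def calculate_fee2(args):
--     """Sort the ages, binary-search for the 19 boundary, derive everything arithmetically."""
--     ages = sorted(args)
--     lo, hi = 0, len(ages)
--     while lo < hi:
--         mid = (lo + hi) // 2
--         if ages[mid] < 19:
--             lo = mid + 1
--         else:
--             hi = mid
--     children = lo
--     adults = len(args) - children
--     return [len(args), adults, children, adults * 10000 + children * 3000]
-- ===== Notes on version B (the rewrite author's own statement) =====
-- stated objective: alternative
-- what changed: B sorts the ages and binary-searches the sorted list for the age-19 boundary, then derives adults, children and the total fee arithmetically from that boundary index, instead of accumulating three counters per element in a branch.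
import Mathlib
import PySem

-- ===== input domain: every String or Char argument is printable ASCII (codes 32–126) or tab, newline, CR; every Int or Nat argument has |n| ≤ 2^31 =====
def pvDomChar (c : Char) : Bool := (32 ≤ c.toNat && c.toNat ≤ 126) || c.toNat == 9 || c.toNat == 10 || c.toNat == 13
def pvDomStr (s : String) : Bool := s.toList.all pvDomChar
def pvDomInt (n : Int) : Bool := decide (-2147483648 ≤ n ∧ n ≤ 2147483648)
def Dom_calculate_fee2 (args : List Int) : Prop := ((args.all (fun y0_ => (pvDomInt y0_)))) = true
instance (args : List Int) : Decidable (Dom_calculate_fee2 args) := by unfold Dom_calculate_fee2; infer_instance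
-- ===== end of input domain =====

-- B sorts the ages and binary-searches the 19-boundary, deriving all outputs arithmetically (alternative algorithm).


-- ===== PORT A =====
-- literal transliteration: fold carrying (total_fee, adults, children)
def calculate_fee2 (args : List Int) : List Int :=
  let st := args.foldl (fun (st : Int × Int × Int) (age : Int) =>
    let (total_fee, adults, children) := st
    if 19 ≤ age then (total_fee + 10000, adults + 1, children)
    else (total_fee + 3000, adults, children + 1)) (0, 0, 0)
  [(args.length : Int), st.2.1, st.2.2, st.1]

-- ===== PORT B =====
-- the while lo < hi loop of Source B; ages[mid] is always in range (lo < hi ≤ len), ported as getD 0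
def bsearch19 (ages : List Int) (lo hi : Nat) : Nat :=
  if lo < hi then
    let mid := (lo + hi) / 2
    if ages.getD mid 0 < 19 then bsearch19 ages (mid + 1) hi
    else bsearch19 ages lo mid
  else lo
termination_by hi - lo
decreasing_by all_goals omega

def calculate_fee2_alt (args : List Int) : List Int :=
  let ages := PySem.List.sorted args (fun x => x) false
  let children : Int := (bsearch19 ages 0 ages.length : Nat)
  let adults : Int := (args.length : Int) - children
  [(args.length : Int), adults, children, adults * 10000 + children * 3000]

-- ===== PRECONDITION & SPEC =====
def Spec_calculate_fee2 (args : List Int) (out : List Int) : Prop := out = calculate_fee2_alt args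
instance (args : List Int) (out : List Int) : Decidable (Spec_calculate_fee2 args out) := by unfold Spec_calculate_fee2; infer_instance

-- ===== CLAIM (what is proved, stated in full; the proofs are below) =====
def Claim_equal_calculate_fee2 : Prop := ∀ (args : List Int), Dom_calculate_fee2 args → Spec_calculate_fee2 args (calculate_fee2 args)

-- ===== LEMMAS AND PROOFS =====

-- A's fold: state from any start equals start plus (fee, adults, children) of the list
theorem calc_fold_inv (args : List Int) (t a c : Int) :
    args.foldl (fun (st : Int × Int × Int) (age : Int) =>
      let (total_fee, adults, children) := st
      if 19 ≤ age then (total_fee + 10000, adults + 1, children)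
      else (total_fee + 3000, adults, children + 1)) (t, a, c)
    = (t + (((args.length : Int)) - ((args.filter (fun age => age < 19)).length : Int)) * 10000
          + ((args.filter (fun age => age < 19)).length : Int) * 3000,
       a + (((args.length : Int)) - ((args.filter (fun age => age < 19)).length : Int)),
       c + ((args.filter (fun age => age < 19)).length : Int)) := by
  induction args generalizing t a c with
  | nil => simp
  | cons x xs ih =>
    by_cases h : (19 : Int) ≤ x
    · have h' : ¬ (x < 19) := by omega
      simp [h, h', ih, List.filter, Prod.ext_iff]
      constructor <;> ring
    · have h' : x < 19 := by omega
      simp [h, h', ih, List.filter, Prod.ext_iff]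
      constructor <;> ring

-- binary search returns a boundary index: everything strictly below it is < 19, everything from it on is ≥ 19
theorem bsearch19_boundary (ages : List Int)
    (hmono : ∀ p q : Nat, p ≤ q → q < ages.length → ages.getD p 0 ≤ ages.getD q 0) :
    ∀ fuel lo hi, hi - lo ≤ fuel → lo ≤ hi → hi ≤ ages.length →
    (∀ i, i < lo → ages.getD i 0 < 19) →
    (∀ i, hi ≤ i → i < ages.length → ¬ ages.getD i 0 < 19) →
    (∀ i, i < bsearch19 ages lo hi → ages.getD i 0 < 19) ∧
    (∀ i, bsearch19 ages lo hi ≤ i → i < ages.length → ¬ ages.getD i 0 < 19) ∧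
    bsearch19 ages lo hi ≤ ages.length := by
  intro fuel
  induction fuel with
  | zero =>
    intro lo hi hf hlh hhl hlow hhigh
    have : ¬ lo < hi := by omega
    rw [bsearch19, if_neg this]
    exact ⟨hlow, by intro i hi1 hi2; exact hhigh i (by omega) hi2, by omega⟩
  | succ n ihn =>
    intro lo hi hf hlh hhl hlow hhigh
    by_cases hlt : lo < hi
    · rw [bsearch19, if_pos hlt]
      set mid := (lo + hi) / 2 with hmid
      have hm1 : lo ≤ mid := by omega
      have hm2 : mid < hi := by omega
      by_cases hv : ages.getD mid 0 < 19
      · simp only [hv, if_pos]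
        apply ihn (mid + 1) hi (by omega) (by omega) hhl
        · intro i hi1
          exact lt_of_le_of_lt (hmono i mid (by omega) (by omega)) hv
        · exact hhigh
      · simp only [hv, ite_false]
        apply ihn lo mid (by omega) (by omega) (by omega) hlow
        · intro i hi1 hi2
          exact fun hc => hv (lt_of_le_of_lt (hmono mid i hi1 hi2) hc)
    · rw [bsearch19, if_neg hlt]
      have : lo = hi := by omega
      subst this
      exact ⟨hlow, by intro i hi1 hi2; exact hhigh i (by omega) hi2, by omega⟩

-- a boundary index of a list IS the length of its <19-filter
theorem boundary_eq_filter_length (ages : List Int) (r : Nat)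
    (hr : r ≤ ages.length)
    (hlow : ∀ i, i < r → ages.getD i 0 < 19)
    (hhigh : ∀ i, r ≤ i → i < ages.length → ¬ ages.getD i 0 < 19) :
    (ages.filter (fun age => age < 19)).length = r := by
  induction ages generalizing r with
  | nil =>
    simp only [List.length_nil] at hr
    have : r = 0 := by omega
    subst this; simp
  | cons x xs ih =>
    cases r with
    | zero =>
      have hx : ¬ x < 19 := hhigh 0 (by omega) (by simp)
      have : ∀ a ∈ x :: xs, ¬ (a < 19) := by
        intro a ha
        rcases List.mem_iff_getElem.mp ha with ⟨i, hlen, hget⟩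
        have := hhigh i (by omega) (by simpa using hlen)
        simpa [List.getD, List.getElem?_eq_getElem hlen, hget] using this
      rw [List.filter_eq_nil_iff.mpr (by intro a ha; simpa using this a ha)]
      rfl
    | succ k =>
      have hx : x < 19 := by simpa using hlow 0 (by omega)
      have hrec : (xs.filter (fun age => age < 19)).length = k := by
        apply ih k (by simpa using hr)
        · intro i hik
          have := hlow (i + 1) (by omega)
          simpa [List.getD] using this
        · intro i hik hilen
          have := hhigh (i + 1) (by omega) (by simpa using Nat.succ_lt_succ hilen)
          simpa [List.getD] using this
      simp [List.filter, hx, hrec]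

-- sorted list is index-monotone (via getD)
theorem sorted_getD_mono (args : List Int) :
    ∀ p q : Nat, p ≤ q → q < (PySem.List.sorted args (fun x => x) false).length →
      (PySem.List.sorted args (fun x => x) false).getD p 0 ≤
      (PySem.List.sorted args (fun x => x) false).getD q 0 := by
  intro p q hpq hq
  have hp : p < (PySem.List.sorted args (fun x => x) false).length := by omega
  have := PySem.List.sorted_id_getElem_mono (xs := args) (p := p) (q := q) hpq hq
  simpa [List.getD, List.getElem?_eq_getElem hp, List.getElem?_eq_getElem hq] using this

-- ===== VERDICT (by name: the statement is the Claim_ definition above) =====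
theorem calculate_fee2_spec : Claim_equal_calculate_fee2 := by
  intro args _
  unfold Spec_calculate_fee2 calculate_fee2 calculate_fee2_alt
  set ages := PySem.List.sorted args (fun x => x) false with hages
  obtain ⟨h1, h2, h3⟩ := bsearch19_boundary ages (sorted_getD_mono args)
    ages.length 0 ages.length (by omega) (by omega) le_rfl
    (by intro i h; omega) (by intro i h1 h2; omega)
  have hcount : (ages.filter (fun age => age < 19)).length = bsearch19 ages 0 ages.length :=
    boundary_eq_filter_length ages _ h3 h1 h2
  have hperm : (ages.filter (fun age => age < 19)).length
      = (args.filter (fun age => age < 19)).length :=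
    (List.Perm.filter _ (PySem.List.sorted_perm ..)).length_eq
  have hlen : ages.length = args.length := (PySem.List.sorted_perm ..).length_eq
  simp only [calc_fold_inv]
  rw [← hcount, hperm]
  simp [zero_add]
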